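-- pv_equiv track=rewrite | github.com/KatieFrogs/fumen-tools | konga2tja/konga2tja.py | reduceNotes
-- ===== SOURCE A (Python) =====
-- def reduceNotes(notes, amount):
-- 	while len(notes) >= amount and len(notes) % amount == 0:
-- 		for i in range(len(notes) - 1, 0, -amount):
-- 			for j in range(amount - 1):
-- 				if notes[i - j] != "0":
-- 					return notes
-- 		for i in range(len(notes) - 1, 0, -amount):
-- 			for j in range(amount - 1):
-- 				del notes[i - j]
-- 	return notes
-- ===== SOURCE B (Python) =====
-- def reduceNotes(notes, amount):
-- 	while len(notes) >= amount and len(notes) % amount == 0: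
-- 		if any(notes[k] != "0" for k in range(len(notes)) if k % amount != 0):
-- 			break
-- 		notes = [notes[k] for k in range(0, len(notes), amount)]
-- 	return notes
-- ===== Notes on version B (the rewrite author's own statement) =====
-- stated objective: alternative
-- what changed: Each collapsing pass becomes a single forward pass: one scan checks the non-anchor (index % amount != 0) elements and one comprehension rebuilds the list from the anchor elements, instead of A's backwards nested range loops deleting the other elements one by one with del; Pre_ excludes only amount values on which A raises ZeroDivisionError (amount=0) or loops forever (amount=1 with nonempty notes, negative amount dividing the length).
import Mathlib
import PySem

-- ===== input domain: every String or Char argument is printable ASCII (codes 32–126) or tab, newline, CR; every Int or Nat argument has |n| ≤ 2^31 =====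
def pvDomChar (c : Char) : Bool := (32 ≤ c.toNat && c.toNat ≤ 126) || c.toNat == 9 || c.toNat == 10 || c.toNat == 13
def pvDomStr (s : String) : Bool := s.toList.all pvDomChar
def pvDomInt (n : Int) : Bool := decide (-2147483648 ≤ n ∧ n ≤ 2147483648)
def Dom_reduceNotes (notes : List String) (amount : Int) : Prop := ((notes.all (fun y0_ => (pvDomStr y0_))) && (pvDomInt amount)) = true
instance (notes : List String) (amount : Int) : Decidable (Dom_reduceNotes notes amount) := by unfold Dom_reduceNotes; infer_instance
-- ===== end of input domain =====

-- B replaces A's backwards nested `del` loops by a single forward pass per collapse step that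
-- rebuilds the list from the anchor elements; A mutates `notes` in place while B rebinds it,
-- so the equivalence proved here is about the RETURN value only.

-- ===== PORT A =====
-- `del ns[i]`; Python raises IndexError when `pop?` is `none` — unreachable on the inputs
-- admitted by Pre_ (all deletion indices are proven in range); exact elsewhere.
def pyDel (ns : List String) (i : Int) : List String :=
  match PySem.List.pop? ns i with
  | some (_, r) => r
  | none => ns

-- the while loop, as fuel recursion; each executed pass shrinks the list by a factor
-- amount ≥ 2, so fuel `notes.length + 1` is never exhausted on inputs admitted by Pre_.
def reduceNotesGo (fuel : Nat) (notes : List String) (amount : Int) : List String :=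
  match fuel with
  | 0 => notes
  | fuel + 1 =>
    if amount ≤ (notes.length : Int) ∧ PySem.Int.mod (notes.length : Int) amount = 0 then
      -- first for-loop: early `return notes` when some checked element is not "0"
      if (PySem.List.pyRange ((notes.length : Int) - 1) 0 (-amount)).any (fun i =>
           (PySem.List.pyRange 0 (amount - 1) 1).any (fun j =>
             PySem.List.pyGetD notes (i - j) "" != "0")) then
        notes
      else
        -- second for-loop: the nested `del notes[i - j]`
        reduceNotesGo fuel
          ((PySem.List.pyRange ((notes.length : Int) - 1) 0 (-amount)).foldl (fun ns i =>
             (PySem.List.pyRange 0 (amount - 1) 1).foldl (fun ns j => pyDel ns (i - j)) ns) notes)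
          amount
    else notes

def reduceNotes (notes : List String) (amount : Int) : List String :=
  reduceNotesGo (notes.length + 1) notes amount

-- ===== PORT B =====
def reduceNotesAltGo (fuel : Nat) (notes : List String) (amount : Int) : List String :=
  match fuel with
  | 0 => notes
  | fuel + 1 =>
    if amount ≤ (notes.length : Int) ∧ PySem.Int.mod (notes.length : Int) amount = 0 then
      if ((PySem.List.pyRange 0 (notes.length : Int) 1).filter (fun k =>
            PySem.Int.mod k amount != 0)).any (fun k =>
              PySem.List.pyGetD notes k "" != "0") then
        notes
      else
        reduceNotesAltGo fuel
          ((PySem.List.pyRange 0 (notes.length : Int) amount).map (fun k =>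
             PySem.List.pyGetD notes k "")) amount
    else notes

def reduceNotes_alt (notes : List String) (amount : Int) : List String :=
  reduceNotesAltGo (notes.length + 1) notes amount

-- ===== PRECONDITION & SPEC =====
-- Pre_ admits exactly the inputs on which A returns: for amount = 0 Python raises
-- ZeroDivisionError, and for amount ≤ -1 dividing len(notes) (both ranges empty) or
-- amount = 1 with notes ≠ [] the while loop never makes progress and A diverges.
def Pre_reduceNotes (notes : List String) (amount : Int) : Prop :=
  2 ≤ amount ∨ (amount ≤ -1 ∧ ¬ (amount ∣ (notes.length : Int))) ∨ (amount = 1 ∧ notes = [])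
instance (notes : List String) (amount : Int) : Decidable (Pre_reduceNotes notes amount) := by
  unfold Pre_reduceNotes; infer_instance

def pvWitness_reduceNotes : List String × Int := (["0", "1", "0", "0"], 2)

def Spec_reduceNotes (notes : List String) (amount : Int) (out : List String) : Prop := out = reduceNotes_alt notes amount
instance (notes : List String) (amount : Int) (out : List String) : Decidable (Spec_reduceNotes notes amount out) := by unfold Spec_reduceNotes; infer_instance

-- ===== CLAIM (what is proved, stated in full; the proofs are below) =====
def Claim_equal_reduceNotes : Prop := ∀ (notes : List String) (amount : Int), Dom_reduceNotes notes amount → Pre_reduceNotes notes amount → Spec_reduceNotes notes amount (reduceNotes notes amount)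

-- ===== LEMMAS AND PROOFS =====

lemma rangeA (M q n : Nat) (hM : 2 ≤ M) (hq : 1 ≤ q) (hn : n = q * M) :
    PySem.List.pyRange ((n : Int) - 1) 0 (-(M : Int)) =
      (List.range q).map (fun (t : Nat) => (n : Int) - 1 - (M : Int) * (t : Int)) := by
  have hM0 : (0:Int) < (M:Int) := by exact_mod_cast Nat.lt_of_lt_of_le (by norm_num) hM
  have hn2 : 2 ≤ n := by
    subst hn; calc 2 ≤ M := hM
    _ ≤ q * M := Nat.le_mul_of_pos_left _ hq
  have hcount : ((n : Int) - 1 - 0 + (M:Int) - 1) / (M:Int) = (q : Int) := by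
    have : (n : Int) - 1 - 0 + (M:Int) - 1 = ((M:Int) - 2) + (q:Int) * (M:Int) := by
      subst hn; push_cast; ring
    rw [this, Int.add_mul_ediv_right _ _ (by omega), Int.ediv_eq_zero_of_lt (by omega) (by omega)]
    simp
  simp only [PySem.List.pyRange]
  rw [if_neg (by omega), if_neg (by omega), if_pos (by omega)]
  simp only [neg_neg, hcount]
  rw [Int.toNat_natCast]
  apply List.map_congr_left
  intro k _
  ring

lemma rangeInner (M : Nat) :
    PySem.List.pyRange 0 ((M : Int) - 1) 1 = (List.range (M - 1)).map (fun (j : Nat) => (j : Int)) := by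
  rw [PySem.List.pyRange_one]
  have : ((M:Int) - 1 - 0).toNat = M - 1 := by omega
  rw [this]
  simp

lemma rangeB (M q n : Nat) (hM : 2 ≤ M) (hq : 1 ≤ q) (hn : n = q * M) :
    PySem.List.pyRange 0 (n : Int) (M : Int) = (List.range q).map (fun (t : Nat) => (M : Int) * (t : Int)) := by
  have hn2 : 2 ≤ n := by
    subst hn; calc 2 ≤ M := hM
    _ ≤ q * M := Nat.le_mul_of_pos_left _ hq
  have hcount : ((n : Int) - 0 + (M:Int) - 1) / (M:Int) = (q : Int) := by
    have : (n : Int) - 0 + (M:Int) - 1 = ((M:Int) - 1) + (q:Int) * (M:Int) := by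
      subst hn; push_cast; ring
    rw [this, Int.add_mul_ediv_right _ _ (by omega), Int.ediv_eq_zero_of_lt (by omega) (by omega)]
    simp
  rw [PySem.List.pyRange_of_pos _ _ (by omega)]
  rw [if_pos (by omega), hcount, Int.toNat_natCast]
  apply List.map_congr_left
  intro k _
  ring

lemma range1 (n : Nat) :
    PySem.List.pyRange 0 (n : Int) 1 = (List.range n).map (fun (k : Nat) => (k : Int)) := by
  rw [PySem.List.pyRange_one]
  have : ((n:Int) - 0).toNat = n := by omega
  rw [this]
  simp

lemma check_eq (xs : List String) (M q : Nat) (hM : 2 ≤ M) (hq : 1 ≤ q)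
    (hn : xs.length = q * M) :
    (((List.range q).map (fun (t : Nat) => (xs.length : Int) - 1 - (M : Int) * (t : Int))).any (fun i =>
       ((List.range (M - 1)).map (fun (j : Nat) => (j : Int))).any (fun j =>
         PySem.List.pyGetD xs (i - j) "" != "0")))
    = ((((List.range xs.length).map (fun (k : Nat) => (k : Int))).filter (fun k =>
          PySem.Int.mod k (M : Int) != 0)).any (fun k =>
            PySem.List.pyGetD xs k "" != "0")) := by
  simp only [hn]
  rw [Bool.eq_iff_iff]
  simp only [List.any_map, List.filter_map, List.any_eq_true, List.mem_range,
    Function.comp, List.mem_filter, bne_iff_ne, ne_eq]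
  constructor
  · rintro ⟨t, ht, j, hj, hP⟩
    obtain ⟨a, ha⟩ := Nat.exists_eq_add_of_lt ht   -- q = t + a + 1
    obtain ⟨b, hb⟩ := Nat.exists_eq_add_of_lt hj   -- M - 1 = j + b + 1
    have hMj : M = j + b + 2 := by omega
    refine ⟨M * a + b + 1, ⟨?_, ?_⟩, ?_⟩
    · have e1 : M*(a+1) = M*a + M := Nat.mul_succ M a
      have e2 : M*(a+1) ≤ M*q := Nat.mul_le_mul_left M (by omega)
      have e3 : M*q = q*M := Nat.mul_comm M q
      omega
    · rw [PySem.Int.mod_natCast]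
      have h1 : (M * a + (b+1)) % M = (b+1) % M := Nat.mul_add_mod M a (b+1)
      have h2 : (b+1) % M = b+1 := Nat.mod_eq_of_lt (by omega)
      have h3 : M * a + b + 1 = M * a + (b+1) := by omega
      rw [h3, h1, h2]
      exact_mod_cast Nat.succ_ne_zero b
    · have hidx : ((q*M : Nat) : Int) - 1 - (M:Int)*(t:Int) - (j:Int) = ((M * a + b + 1 : Nat) : Int) := by
        have hq' : q = t + a + 1 := by omega
        subst hq' hMj
        push_cast
        ring
      rwa [hidx] at hP
  · rintro ⟨k, ⟨hk, hmod⟩, hP⟩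
    have hM0 : 0 < M := by omega
    have hr1 : k % M ≠ 0 := by
      rw [PySem.Int.mod_natCast] at hmod
      exact_mod_cast hmod
    have hrM : k % M < M := Nat.mod_lt _ hM0
    have haq : k / M < q := by
      by_contra hcon
      push Not at hcon
      have h1 : q * M ≤ (k / M) * M := Nat.mul_le_mul_right M hcon
      have h2 : (k / M) * M ≤ k := Nat.div_mul_le_self k M
      omega
    obtain ⟨a, ha⟩ : ∃ a, k / M = a := ⟨_, rfl⟩
    obtain ⟨r, hr⟩ : ∃ r, k % M = r := ⟨_, rfl⟩
    rw [ha] at haq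
    rw [hr] at hr1 hrM
    have hsplit : M * a + r = k := by rw [← ha, ← hr]; exact Nat.div_add_mod k M
    refine ⟨q - 1 - a, by omega, M - 1 - r, by omega, ?_⟩
    have hidx : ((q*M : Nat) : Int) - 1 - (M:Int)*((q - 1 - a : Nat):Int) - ((M - 1 - r : Nat):Int) = ((k : Nat) : Int) := by
      have hc : ((q - 1 - a : Nat) : Int) = (q:Int) - 1 - (a:Int) := by omega
      have hd : ((M - 1 - r : Nat) : Int) = (M:Int) - 1 - (r:Int) := by omega
      have hs : ((k:Nat):Int) = (M:Int) * (a:Int) + (r:Int) := by exact_mod_cast hsplit.symm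
      rw [hc, hd, hs]
      push_cast
      ring
    rw [hidx]
    exact hP

lemma take_dropLast (us : List String) (n : Nat) (h : n ≤ us.length) :
    (us.take n).dropLast = us.take (n - 1) := by
  rw [List.dropLast_eq_take, List.take_take]
  congr 1
  simp
  omega

lemma pyDel_last (us bs : List String) (h : us ≠ []) :
    pyDel (us ++ bs) ((us.length : Int) - 1) = us.dropLast ++ bs := by
  have hlen : 1 ≤ us.length := List.length_pos_iff.mpr h
  have hlab : (us ++ bs).length = us.length + bs.length := List.length_append
  have hk : us.length - 1 < (us ++ bs).length := by omega
  unfold pyDel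
  rw [PySem.List.pop?]
  have hidx : PySem.List.pyIdx? (us ++ bs).length ((us.length : Int) - 1) = some (us.length - 1) := by
    simp only [PySem.List.pyIdx?]
    rw [if_pos (by omega), if_pos (by omega)]
    congr 1
    omega
  rw [hidx]
  simp only [Option.bind_some]
  rw [List.getElem?_eq_getElem hk]
  simp only [Option.map_some]
  rw [List.eraseIdx_append_of_lt_length (by omega)]
  rw [List.eraseIdx_length_sub_one]

lemma inner_del (d : Nat) (as bs : List String) (h : d ≤ as.length) :
    ((List.range d).map (fun (j : Nat) => (j : Int))).foldl
      (fun ns j => pyDel ns ((as.length : Int) - 1 - j)) (as ++ bs)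
    = as.take (as.length - d) ++ bs := by
  induction d with
  | zero => simp
  | succ d ih =>
    rw [List.range_succ, List.map_append, List.foldl_append, ih (by omega)]
    simp only [List.map_cons, List.map_nil, List.foldl_cons, List.foldl_nil]
    have hlen : (as.take (as.length - d)).length = as.length - d := by simp
    have hne : as.take (as.length - d) ≠ [] := by
      rw [← List.length_pos_iff]; omega
    have hcast : (as.length : Int) - 1 - (d : Int) = ((as.take (as.length - d)).length : Int) - 1 := by
      rw [hlen]; omega
    rw [hcast, pyDel_last _ _ hne]
    congr 1
    rw [take_dropLast _ _ (by omega)]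
    congr 1

lemma outer_del (xs : List String) (M q : Nat) (hM : 2 ≤ M) (hn : xs.length = q * M) :
    ∀ d, d ≤ q →
      ((List.range d).map (fun (t : Nat) => (xs.length : Int) - 1 - (M : Int) * (t : Int))).foldl
        (fun ns i => ((List.range (M - 1)).map (fun (j : Nat) => (j : Int))).foldl
          (fun ns j => pyDel ns (i - j)) ns) xs
      = xs.take (q * M - d * M) ++ (List.range d).map (fun r => xs.getD (q * M - d * M + r * M) "") := by
  intro d
  induction d with
  | zero =>
    simp only [List.range_zero, List.map_nil, List.foldl_nil, Nat.zero_mul, Nat.sub_zero,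
      List.append_nil]
    intro _
    rw [← hn, List.take_length]
  | succ d ih =>
    intro hd1
    have hdm : d * M ≤ q * M := Nat.mul_le_mul_right M (by omega)
    have hdm1 : (d + 1) * M ≤ q * M := Nat.mul_le_mul_right M (by omega)
    have hsm : (d + 1) * M = d * M + M := Nat.succ_mul d M
    rw [List.range_succ, List.map_append, List.foldl_append, ih (by omega)]
    simp only [List.map_cons, List.map_nil, List.foldl_cons, List.foldl_nil]
    have hlenas : (xs.take (q * M - d * M)).length = q * M - d * M := by simp; omega
    have hi : (xs.length : Int) - 1 - (M : Int) * (d : Int)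
        = ((xs.take (q * M - d * M)).length : Int) - 1 := by
      rw [hlenas, hn]
      have h1 : ((q * M - d * M : Nat) : Int) = ((q*M : Nat) : Int) - ((d*M : Nat):Int) := by omega
      rw [h1]
      push_cast
      ring
    simp only [hi]
    rw [inner_del (M - 1) _ _ (by omega)]
    rw [hlenas, List.take_take]
    have hmin : min (q * M - d * M - (M - 1)) (q * M - d * M) = (q * M - (d+1) * M) + 1 := by omega
    rw [hmin]
    have hK : q * M - (d+1) * M < xs.length := by omega
    rw [List.take_add_one, List.getElem?_eq_getElem hK]
    simp only [Option.toList_some]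
    rw [List.append_assoc]
    congr 1
    rw [← List.range_succ, List.range_succ_eq_map, List.map_cons, List.map_map]
    rw [List.singleton_append]
    congr 1
    · have h0 : q * M - (d + 1) * M + 0 * M = q * M - (d + 1) * M := by omega
      rw [h0, List.getD_eq_getElem xs "" hK]
    · apply List.map_congr_left
      intro r hr
      simp only [Function.comp]
      congr 1
      have h1 := Nat.succ_mul r M
      omega

lemma pass_eq (xs : List String) (M q : Nat) (hM : 2 ≤ M) (_hq : 1 ≤ q)
    (hn : xs.length = q * M) :
    ((List.range q).map (fun (t : Nat) => (xs.length : Int) - 1 - (M : Int) * (t : Int))).foldl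
      (fun ns i => ((List.range (M - 1)).map (fun (j : Nat) => (j : Int))).foldl
        (fun ns j => pyDel ns (i - j)) ns) xs
    = ((List.range q).map (fun (t : Nat) => (M : Int) * (t : Int))).map (fun k => PySem.List.pyGetD xs k "") := by
  rw [outer_del xs M q hM hn q (le_refl q)]
  simp only [Nat.sub_self, List.take_zero, List.nil_append, Nat.zero_add, List.map_map]
  apply List.map_congr_left
  intro r hr
  simp only [Function.comp]
  have h1 : (M : Int) * (r : Int) = ((M * r : Nat) : Int) := by push_cast; ring
  rw [h1, PySem.List.pyGetD_natCast]
  rw [Nat.mul_comm]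

lemma go_eq (fuel : Nat) : ∀ (xs : List String) (m : Int), 2 ≤ m →
    reduceNotesGo fuel xs m = reduceNotesAltGo fuel xs m := by
  induction fuel with
  | zero => intro xs m _; rfl
  | succ f ih =>
    intro xs m hm
    by_cases hg : (m ≤ (xs.length : Int) ∧ PySem.Int.mod (xs.length : Int) m = 0)
    · have hm0 : (0:Int) ≤ m := by omega
      have hmM : m = ((m.toNat : Nat) : Int) := (Int.toNat_of_nonneg hm0).symm
      set M := m.toNat with hMdef
      have hM2 : 2 ≤ M := by omega
      have hdvd : M ∣ xs.length := by
        have h1 : m ∣ (xs.length : Int) := (PySem.Int.mod_eq_zero_iff_dvd _ _).mp hg.2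
        rw [hmM] at h1
        exact_mod_cast h1
      obtain ⟨q, hq⟩ := hdvd
      have hn : xs.length = q * M := by rw [hq]; ring
      have hlen : M ≤ xs.length := by
        have h1 := hg.1
        rw [hmM] at h1
        exact_mod_cast h1
      have hq1 : 1 ≤ q := by
        by_contra hcq
        have hq0 : q = 0 := by omega
        rw [hq0, Nat.zero_mul] at hn
        omega
      simp only [reduceNotesGo, reduceNotesAltGo, if_pos hg]
      rw [hmM]
      rw [rangeA M q xs.length hM2 hq1 hn, rangeInner M, range1 xs.length,
        rangeB M q xs.length hM2 hq1 hn, check_eq xs M q hM2 hq1 hn,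
        pass_eq xs M q hM2 hq1 hn]
      split_ifs with hc
      · rfl
      · rw [← hmM]
        exact ih _ _ hm
    · simp only [reduceNotesGo, reduceNotesAltGo, if_neg hg]

-- ===== VERDICT (by name: the statement is the Claim_ definition above) =====
theorem reduceNotes_spec : Claim_equal_reduceNotes := by
  intro notes amount _ hpre
  unfold Spec_reduceNotes reduceNotes reduceNotes_alt
  rcases hpre with h2 | ⟨hneg, hndvd⟩ | ⟨h1, hnil⟩
  · exact go_eq _ _ _ h2
  · have hg : ¬ (amount ≤ (notes.length : Int) ∧ PySem.Int.mod (notes.length : Int) amount = 0) := by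
      rintro ⟨-, hmod⟩
      exact hndvd ((PySem.Int.mod_eq_zero_iff_dvd _ _).mp hmod)
    simp [reduceNotesGo, reduceNotesAltGo, hg]
  · subst h1; subst hnil; simp [reduceNotesGo, reduceNotesAltGo]
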